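-- pv_equiv track=rewrite | github.com/veggero/nylo | nyparser.py | parse_string_to_indentation
-- ===== SOURCE A (Python) =====
-- def parse_string_to_indentation(code, index):
-- 	indentation_level = 0
-- 	# Raise indentation_level at every space or tab until first non
-- 	# whitespace element
-- 	while code[index] in '\t ':
-- 		indentation_level += 1
-- 		index += 1
--
-- 	if code[index] == '\n':
-- 		indentation_level, index = parse_string_to_indentation(code, index+1)
--
-- 	return indentation_level, index
-- ===== SOURCE B (Python) =====
-- def parse_string_to_indentation(code, index):
-- 	# Two-phase: first find the stopping position j (first character at or
-- 	# after index that is not tab/space/newline), then walk a cursor k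
-- 	# backwards over the run of tabs/spaces that ends at j (never past
-- 	# index); the indentation level is the length j - k of that run.
-- 	j = index
-- 	while code[j] in '\t \n':
-- 		j += 1
-- 	k = j
-- 	while k - 1 >= index and code[k - 1] in '\t ':
-- 		k -= 1
-- 	return j - k, j
-- ===== Notes on version B (the rewrite author's own statement) =====
-- stated objective: alternative
-- what changed: Replaces the recursive count-and-reset-on-newline scan by a two-phase algorithm: first find the stopping position (first char not in '\t \n') with a forward cursor, then walk a second cursor backwards over the tab/space run ending there; no counter resets and no recursion.
import Mathlib
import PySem

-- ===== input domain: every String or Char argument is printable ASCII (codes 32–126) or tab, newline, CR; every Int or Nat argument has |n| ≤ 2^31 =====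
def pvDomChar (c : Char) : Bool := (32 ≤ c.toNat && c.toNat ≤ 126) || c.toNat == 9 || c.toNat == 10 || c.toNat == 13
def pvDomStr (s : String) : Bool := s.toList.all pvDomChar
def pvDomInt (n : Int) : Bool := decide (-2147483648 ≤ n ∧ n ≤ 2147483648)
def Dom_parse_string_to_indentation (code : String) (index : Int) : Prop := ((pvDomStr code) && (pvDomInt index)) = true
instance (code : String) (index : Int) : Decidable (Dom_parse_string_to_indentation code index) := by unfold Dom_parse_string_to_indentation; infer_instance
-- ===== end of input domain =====

-- B replaces A's recursive reset-on-newline counting scan by a two-phase algorithm: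
-- a forward cursor finds the stopping position, then a second cursor walks backwards
-- over the tab/space run ending there (objective: alternative; same O(n) cost).
-- A's fuel parameters only make its loops total; they are always sufficient on the
-- admitted inputs.

-- ===== PORT A =====
-- the inner `while code[index] in '\t ':` loop of A (state: indentation_level, index)
def pvWsScanF (cs : List Char) (fuel : Nat) (lvl idx : Int) : Int × Int :=
  match fuel, PySem.List.pyGet? cs idx with
  | 0, _ => (lvl, idx)
  | fuel + 1, some c =>
    if c = '\t' ∨ c = ' ' then pvWsScanF cs fuel (lvl + 1) (idx + 1) else (lvl, idx)
  | _ + 1, none => (lvl, idx)      -- code[index] raises IndexError in Python here; excluded by Pre_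

def pvWsScan (cs : List Char) (lvl idx : Int) : Int × Int :=
  pvWsScanF cs (((cs.length : Int) - idx).toNat + 1) lvl idx

-- the body of A: run the whitespace loop, then on '\n' recurse at the next index
def pvAgoF (cs : List Char) (fuel : Nat) (index : Int) : Int × Int :=
  match fuel with
  | 0 => (0, index)
  | fuel + 1 =>
    let p := pvWsScan cs 0 index
    if PySem.List.pyGet? cs p.2 = some '\n' then pvAgoF cs fuel (p.2 + 1) else p

def pvAgo (cs : List Char) (index : Int) : Int × Int :=
  pvAgoF cs (((cs.length : Int) - index).toNat + 1) index

def parse_string_to_indentation (code : String) (index : Int) : Int × Int :=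
  pvAgo code.toList index

-- ===== PORT B =====
-- `j = index; while code[j] in '\t \n': j += 1` — forward cursor to the stopping position
-- (an out-of-range read raises IndexError in Python; excluded by Pre_, the loop just stops;
-- the fuel argument only makes the loop total and is always sufficient)
def pvFindF (cs : List Char) (fuel : Nat) (j : Int) : Int :=
  match fuel with
  | 0 => j
  | f + 1 =>
    if (PySem.List.pyGet? cs j).any (fun c => c == '\t' || c == ' ' || c == '\n')
    then pvFindF cs f (j + 1)
    else j

def pvFind (cs : List Char) (j : Int) : Int :=
  pvFindF cs (((cs.length : Int) - j).toNat + 1) j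

-- `k = j; while k - 1 >= index and code[k - 1] in '\t ': k -= 1` — backward cursor
def pvCountF (cs : List Char) (fuel : Nat) (index k : Int) : Int :=
  match fuel with
  | 0 => k
  | f + 1 =>
    if index ≤ k - 1 ∧ (PySem.List.pyGet? cs (k - 1)).any (fun c => c == '\t' || c == ' ')
    then pvCountF cs f index (k - 1)
    else k

def pvCount (cs : List Char) (index k : Int) : Int :=
  pvCountF cs ((k - index).toNat + 1) index k

def parse_string_to_indentation_alt (code : String) (index : Int) : Int × Int :=
  let j := pvFind code.toList index
  let k := pvCount code.toList index j
  (j - k, j)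

-- ===== PRECONDITION & SPEC =====
-- Pre_ excludes exactly the inputs on which Python's A raises IndexError: an initial index
-- below -len(code), or no character at a position ≥ index outside '\t \n' (the scan then
-- runs off the end of the string).
def Pre_parse_string_to_indentation (code : String) (index : Int) : Prop :=
  -(code.toList.length : Int) ≤ index ∧
  ∃ j ∈ List.range code.toList.length,
    index ≤ (j : Int) ∧ code.toList.getD j ' ' ∉ (['\t', ' ', '\n'] : List Char)
instance (code : String) (index : Int) : Decidable (Pre_parse_string_to_indentation code index) := by
  unfold Pre_parse_string_to_indentation; infer_instance
def pvWitness_parse_string_to_indentation : String × Int := ("  x", 0)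
def Spec_parse_string_to_indentation (code : String) (index : Int) (out : Int × Int) : Prop := out = parse_string_to_indentation_alt code index
instance (code : String) (index : Int) (out : Int × Int) : Decidable (Spec_parse_string_to_indentation code index out) := by unfold Spec_parse_string_to_indentation; infer_instance

-- ===== CLAIM (what is proved, stated in full; the proofs are below) =====
def Claim_equal_parse_string_to_indentation : Prop := ∀ (code : String) (index : Int), Dom_parse_string_to_indentation code index → Pre_parse_string_to_indentation code index → Spec_parse_string_to_indentation code index (parse_string_to_indentation code index)

-- ===== LEMMAS AND PROOFS =====

-- an in-bounds read pins the index
theorem pvGet_some_lt (cs : List Char) (i : Int) {c : Char}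
    (h : PySem.List.pyGet? cs i = some c) : -(cs.length : Int) ≤ i ∧ i < (cs.length : Int) := by
  have h2 : PySem.Raise.InRange cs.length i := by
    by_contra hn
    rw [(PySem.List.pyGet?_eq_none_iff cs i).2 hn] at h
    simp at h
  unfold PySem.Raise.InRange at h2
  omega

-- one-step unfolding of A's fueled loops
theorem pvWsScanF_succ_some (cs : List Char) (f : Nat) (lvl idx : Int) {c : Char}
    (h : PySem.List.pyGet? cs idx = some c) :
    pvWsScanF cs (f + 1) lvl idx =
      if c = '\t' ∨ c = ' ' then pvWsScanF cs f (lvl + 1) (idx + 1) else (lvl, idx) := by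
  rw [pvWsScanF.eq_def]
  split
  · omega
  · rename_i f' c' hf h'; rw [h] at h'; injection h' with h''; subst h''
    injection hf with hf'; subst hf'; rfl
  · rename_i f' hf h'; rw [h] at h'; simp at h'

theorem pvWsScanF_none (cs : List Char) (f : Nat) (lvl idx : Int)
    (h : PySem.List.pyGet? cs idx = none) : pvWsScanF cs f lvl idx = (lvl, idx) := by
  rw [pvWsScanF.eq_def]
  split
  · rfl
  · rename_i f' c' _ h'; rw [h] at h'; simp at h'
  · rfl

-- fuel irrelevance: any sufficient fuel computes the loop's value
theorem pvWsScanF_irrel (cs : List Char) (f g : Nat) (lvl idx : Int)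
    (hf : ((cs.length : Int) - idx).toNat < f) (hg : ((cs.length : Int) - idx).toNat < g) :
    pvWsScanF cs f lvl idx = pvWsScanF cs g lvl idx := by
  induction f generalizing g lvl idx with
  | zero => omega
  | succ f' ih =>
    obtain ⟨g', rfl⟩ : ∃ g'', g = g'' + 1 := ⟨g - 1, by omega⟩
    cases hc : PySem.List.pyGet? cs idx with
    | none => rw [pvWsScanF_none cs _ _ _ hc, pvWsScanF_none cs _ _ _ hc]
    | some c =>
      rw [pvWsScanF_succ_some cs f' lvl idx hc, pvWsScanF_succ_some cs g' lvl idx hc]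
      by_cases hws : c = '\t' ∨ c = ' '
      · rw [if_pos hws, if_pos hws]
        have hlt := pvGet_some_lt cs idx hc
        exact ih g' (lvl + 1) (idx + 1) (by omega) (by omega)
      · rw [if_neg hws, if_neg hws]

theorem pvWsScan_eq_some (cs : List Char) (lvl idx : Int) {c : Char}
    (h : PySem.List.pyGet? cs idx = some c) :
    pvWsScan cs lvl idx =
      if c = '\t' ∨ c = ' ' then pvWsScan cs (lvl + 1) (idx + 1) else (lvl, idx) := by
  have := pvGet_some_lt cs idx h
  unfold pvWsScan
  rw [pvWsScanF_succ_some cs _ lvl idx h]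
  by_cases hws : c = '\t' ∨ c = ' '
  · rw [if_pos hws, if_pos hws]
    exact pvWsScanF_irrel cs _ _ (lvl + 1) (idx + 1) (by omega) (by omega)
  · rw [if_neg hws, if_neg hws]

theorem pvWsScan_eq_none (cs : List Char) (lvl idx : Int)
    (h : PySem.List.pyGet? cs idx = none) : pvWsScan cs lvl idx = (lvl, idx) :=
  pvWsScanF_none cs _ lvl idx h

-- A's whitespace loop only moves the index forward
theorem pvWsScan_le (cs : List Char) (lvl idx : Int) : idx ≤ (pvWsScan cs lvl idx).2 := by
  cases hc : PySem.List.pyGet? cs idx with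
  | none => rw [pvWsScan_eq_none cs lvl idx hc]
  | some c =>
    rw [pvWsScan_eq_some cs lvl idx hc]
    by_cases hws : c = '\t' ∨ c = ' '
    · rw [if_pos hws]
      have hlt := pvGet_some_lt cs idx hc
      have := pvWsScan_le cs (lvl + 1) (idx + 1)
      omega
    · rw [if_neg hws]
termination_by (((cs.length : Int) - idx)).toNat
decreasing_by
  have := pvGet_some_lt cs idx hc
  omega

-- full characterisation of A's inner whitespace loop
theorem pvWsScan_spec (cs : List Char) (lvl idx : Int) :
    (pvWsScan cs lvl idx).1 = lvl + ((pvWsScan cs lvl idx).2 - idx) ∧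
    (∀ k : Int, idx ≤ k → k < (pvWsScan cs lvl idx).2 →
      ∃ c, PySem.List.pyGet? cs k = some c ∧ (c = '\t' ∨ c = ' ')) ∧
    (∀ c, PySem.List.pyGet? cs (pvWsScan cs lvl idx).2 = some c → ¬(c = '\t' ∨ c = ' ')) := by
  cases hc : PySem.List.pyGet? cs idx with
  | none =>
    rw [pvWsScan_eq_none cs lvl idx hc]
    exact ⟨by omega, by omega, fun c' h' => by rw [hc] at h'; simp at h'⟩
  | some c =>
    rw [pvWsScan_eq_some cs lvl idx hc]
    by_cases hws : c = '\t' ∨ c = ' '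
    · rw [if_pos hws]
      have hlt := pvGet_some_lt cs idx hc
      obtain ⟨ih1, ih2, ih3⟩ := pvWsScan_spec cs (lvl + 1) (idx + 1)
      have hle := pvWsScan_le cs (lvl + 1) (idx + 1)
      refine ⟨by omega, ?_, ih3⟩
      intro k hk1 hk2
      rcases eq_or_lt_of_le hk1 with heq | hlt2
      · exact ⟨c, heq ▸ hc, hws⟩
      · exact ih2 k (by omega) hk2
    · rw [if_neg hws]
      refine ⟨by omega, by omega, ?_⟩
      intro c' h'
      rw [hc] at h'; injection h' with h''; subst h''; exact hws
termination_by (((cs.length : Int) - idx)).toNat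
decreasing_by
  have := pvGet_some_lt cs idx hc
  omega

theorem pvAgoF_irrel (cs : List Char) (f g : Nat) (index : Int)
    (hf : ((cs.length : Int) - index).toNat < f) (hg : ((cs.length : Int) - index).toNat < g) :
    pvAgoF cs f index = pvAgoF cs g index := by
  induction f generalizing g index with
  | zero => omega
  | succ f' ih =>
    obtain ⟨g', rfl⟩ : ∃ g'', g = g'' + 1 := ⟨g - 1, by omega⟩
    simp only [pvAgoF]
    by_cases hc : PySem.List.pyGet? cs (pvWsScan cs 0 index).2 = some '\n'
    · rw [if_pos hc, if_pos hc]
      have hlt := pvGet_some_lt cs (pvWsScan cs 0 index).2 hc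
      have hle : index ≤ (pvWsScan cs 0 index).2 := pvWsScan_le cs 0 index
      exact ih g' ((pvWsScan cs 0 index).2 + 1) (by omega) (by omega)
    · rw [if_neg hc, if_neg hc]

theorem pvAgo_eq (cs : List Char) (index : Int) :
    pvAgo cs index =
      if PySem.List.pyGet? cs (pvWsScan cs 0 index).2 = some '\n'
      then pvAgo cs ((pvWsScan cs 0 index).2 + 1)
      else pvWsScan cs 0 index := by
  unfold pvAgo
  simp only [pvAgoF]
  by_cases hc : PySem.List.pyGet? cs (pvWsScan cs 0 index).2 = some '\n'
  · rw [if_pos hc, if_pos hc]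
    have hlt := pvGet_some_lt cs (pvWsScan cs 0 index).2 hc
    have hle : index ≤ (pvWsScan cs 0 index).2 := pvWsScan_le cs 0 index
    exact pvAgoF_irrel cs (((cs.length : Int) - index).toNat)
      ((((cs.length : Int) - ((pvWsScan cs 0 index).2 + 1)).toNat) + 1)
      ((pvWsScan cs 0 index).2 + 1) (by omega) (by omega)
  · rw [if_neg hc, if_neg hc]

-- fuel irrelevance and step lemmas for B's loops
theorem pvFindF_irrel (cs : List Char) (f g : Nat) (j : Int)
    (hf : ((cs.length : Int) - j).toNat < f) (hg : ((cs.length : Int) - j).toNat < g) :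
    pvFindF cs f j = pvFindF cs g j := by
  induction f generalizing g j with
  | zero => omega
  | succ f' ih =>
    obtain ⟨g', rfl⟩ : ∃ g'', g = g'' + 1 := ⟨g - 1, by omega⟩
    simp only [pvFindF]
    by_cases hb : ((PySem.List.pyGet? cs j).any (fun c => c == '\t' || c == ' ' || c == '\n')) = true
    · rw [if_pos hb, if_pos hb]
      cases hc : PySem.List.pyGet? cs j with
      | none => rw [hc] at hb; simp at hb
      | some c =>
        have := pvGet_some_lt cs j hc
        exact ih g' (j + 1) (by omega) (by omega)
    · rw [if_neg hb, if_neg hb]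

theorem pvCountF_irrel (cs : List Char) (f g : Nat) (index k : Int)
    (hf : (k - index).toNat < f) (hg : (k - index).toNat < g) :
    pvCountF cs f index k = pvCountF cs g index k := by
  induction f generalizing g k with
  | zero => omega
  | succ f' ih =>
    obtain ⟨g', rfl⟩ : ∃ g'', g = g'' + 1 := ⟨g - 1, by omega⟩
    simp only [pvCountF]
    by_cases hb : index ≤ k - 1 ∧ ((PySem.List.pyGet? cs (k - 1)).any (fun c => c == '\t' || c == ' ')) = true
    · rw [if_pos hb, if_pos hb]
      exact ih g' (k - 1) (by omega) (by omega)
    · rw [if_neg hb, if_neg hb]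

theorem pvFindF_succ (cs : List Char) (f : Nat) (j : Int) :
    pvFindF cs (f + 1) j =
      if (PySem.List.pyGet? cs j).any (fun c => c == '\t' || c == ' ' || c == '\n')
      then pvFindF cs f (j + 1) else j := rfl

theorem pvCountF_succ (cs : List Char) (f : Nat) (index k : Int) :
    pvCountF cs (f + 1) index k =
      if index ≤ k - 1 ∧ (PySem.List.pyGet? cs (k - 1)).any (fun c => c == '\t' || c == ' ')
      then pvCountF cs f index (k - 1) else k := rfl

theorem pvFind_some (cs : List Char) (j : Int) {c : Char}
    (h : PySem.List.pyGet? cs j = some c) :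
    pvFind cs j = if c = '\t' ∨ c = ' ' ∨ c = '\n' then pvFind cs (j + 1) else j := by
  have hlt := pvGet_some_lt cs j h
  unfold pvFind
  rw [pvFindF_succ cs _ j]
  by_cases hws : c = '\t' ∨ c = ' ' ∨ c = '\n'
  · rw [if_pos hws, if_pos (by simp [h]; rcases hws with h'|h'|h' <;> simp [h'])]
    exact pvFindF_irrel cs _ _ (j + 1) (by omega) (by omega)
  · rw [if_neg hws, if_neg (by simp [h]; tauto)]

theorem pvFind_none (cs : List Char) (j : Int)
    (h : PySem.List.pyGet? cs j = none) : pvFind cs j = j := by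
  unfold pvFind
  rw [pvFindF_succ cs _ j, if_neg (by simp [h])]

theorem pvCount_step (cs : List Char) (index k : Int) {c : Char}
    (hg : index ≤ k - 1) (h : PySem.List.pyGet? cs (k - 1) = some c) :
    pvCount cs index k = if c = '\t' ∨ c = ' ' then pvCount cs index (k - 1) else k := by
  unfold pvCount
  rw [pvCountF_succ cs _ index k]
  by_cases hws : c = '\t' ∨ c = ' '
  · rw [if_pos hws, if_pos ⟨hg, by simp [h]; rcases hws with h'|h' <;> simp [h']⟩]
    exact pvCountF_irrel cs _ _ index (k - 1) (by omega) (by omega)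
  · rw [if_neg hws, if_neg (by simp [h]; tauto)]

theorem pvCount_none (cs : List Char) (index k : Int)
    (h : PySem.List.pyGet? cs (k - 1) = none) : pvCount cs index k = k := by
  unfold pvCount
  rw [pvCountF_succ cs _ index k, if_neg (by simp [h])]

theorem pvCount_stop (cs : List Char) (index k : Int)
    (hg : ¬ index ≤ k - 1) : pvCount cs index k = k := by
  unfold pvCount
  rw [pvCountF_succ cs _ index k, if_neg (by tauto)]

-- B's forward cursor skips any whitespace-only prefix
theorem pvFind_skip (cs : List Char) (idx m : Int) (hle : idx ≤ m)
    (hws : ∀ k : Int, idx ≤ k → k < m →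
      ∃ c, PySem.List.pyGet? cs k = some c ∧ (c = '\t' ∨ c = ' ')) :
    pvFind cs idx = pvFind cs m := by
  by_cases hstop : idx = m
  · rw [hstop]
  · have h1 : idx < m := by omega
    obtain ⟨c, hc, hcw⟩ := hws idx (le_refl _) h1
    rw [pvFind_some cs idx hc, if_pos (by tauto)]
    exact pvFind_skip cs (idx + 1) m (by omega) (fun k hk1 hk2 => hws k (by omega) hk2)
termination_by (m - idx).toNat
decreasing_by omega

theorem pvFind_ge (cs : List Char) (j : Int) : j ≤ pvFind cs j := by
  cases hc : PySem.List.pyGet? cs j with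
  | none => rw [pvFind_none cs j hc]
  | some c =>
    rw [pvFind_some cs j hc]
    by_cases hws : c = '\t' ∨ c = ' ' ∨ c = '\n'
    · rw [if_pos hws]
      have hlt := pvGet_some_lt cs j hc
      have := pvFind_ge cs (j + 1)
      omega
    · rw [if_neg hws]
termination_by (((cs.length : Int) - j)).toNat
decreasing_by
  have := pvGet_some_lt cs j hc
  omega

-- the backward cursor over an all-whitespace block walks down to its start
theorem pvCount_full (cs : List Char) (i m : Int) (hle : i ≤ m)
    (hws : ∀ k : Int, i ≤ k → k < m →
      ∃ c, PySem.List.pyGet? cs k = some c ∧ (c = '\t' ∨ c = ' ')) :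
    pvCount cs i m = i := by
  by_cases hg : i ≤ m - 1
  · obtain ⟨c, hc, hcw⟩ := hws (m - 1) hg (by omega)
    rw [pvCount_step cs i m hg hc, if_pos hcw]
    exact pvCount_full cs i (m - 1) hg (fun k hk1 hk2 => hws k hk1 (by omega))
  · rw [pvCount_stop cs i m hg]; omega
termination_by (m - i).toNat
decreasing_by omega

-- the backward cursor never passes a '\n': the lower bound may be moved up to just after it
theorem pvCount_cut (cs : List Char) (index m k : Int)
    (hnl : PySem.List.pyGet? cs m = some '\n') (him : index ≤ m) (hmk : m + 1 ≤ k) :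
    pvCount cs index k = pvCount cs (m + 1) k := by
  by_cases hg : m + 1 ≤ k - 1
  · cases hc : PySem.List.pyGet? cs (k - 1) with
    | none =>
      rw [pvCount_none cs index k hc, pvCount_none cs (m + 1) k hc]
    | some c =>
      rw [pvCount_step cs index k (by omega) hc, pvCount_step cs (m + 1) k hg hc]
      by_cases hcw : c = '\t' ∨ c = ' '
      · rw [if_pos hcw, if_pos hcw]
        exact pvCount_cut cs index m (k - 1) hnl him (by omega)
      · rw [if_neg hcw, if_neg hcw]
  · have hm : k - 1 = m := by omega
    rw [pvCount_step cs index k (by omega) (hm ▸ hnl), if_neg (by simp),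
        pvCount_stop cs (m + 1) k (by omega)]
termination_by (k - m).toNat
decreasing_by omega

-- main equality: A's recursion equals B's find-then-count, for every input
theorem pv_main (cs : List Char) (index : Int) :
    pvAgo cs index = (pvFind cs index - pvCount cs index (pvFind cs index), pvFind cs index) := by
  obtain ⟨hs1, hs2, hs3⟩ := pvWsScan_spec cs 0 index
  have hle := pvWsScan_le cs 0 index
  have hfind1 : pvFind cs index = pvFind cs (pvWsScan cs 0 index).2 :=
    pvFind_skip cs index _ hle hs2
  rw [pvAgo_eq]
  by_cases hnl : PySem.List.pyGet? cs (pvWsScan cs 0 index).2 = some '\n'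
  · rw [if_pos hnl]
    have hlt := pvGet_some_lt cs (pvWsScan cs 0 index).2 hnl
    have hfind2 : pvFind cs (pvWsScan cs 0 index).2 = pvFind cs ((pvWsScan cs 0 index).2 + 1) := by
      rw [pvFind_some cs _ hnl, if_pos (by tauto)]
    have hJ : (pvWsScan cs 0 index).2 + 1 ≤ pvFind cs ((pvWsScan cs 0 index).2 + 1) :=
      pvFind_ge cs _
    rw [pv_main cs ((pvWsScan cs 0 index).2 + 1), hfind1, hfind2]
    have hcut := pvCount_cut cs index (pvWsScan cs 0 index).2
      (pvFind cs ((pvWsScan cs 0 index).2 + 1)) hnl hle (by omega)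
    rw [hcut]
  · rw [if_neg hnl]
    have hfind2 : pvFind cs (pvWsScan cs 0 index).2 = (pvWsScan cs 0 index).2 := by
      cases hc : PySem.List.pyGet? cs (pvWsScan cs 0 index).2 with
      | none => exact pvFind_none cs _ hc
      | some c =>
        have hnw := hs3 c hc
        have hcn : ¬ c = '\n' := by
          intro hcc; subst hcc; exact hnl hc
        rw [pvFind_some cs _ hc, if_neg (by tauto)]
    have hcount : pvCount cs index (pvWsScan cs 0 index).2 = index :=
      pvCount_full cs index _ (by omega) (fun k hk1 hk2 => hs2 k hk1 (by omega))
    rw [hfind1, hfind2, hcount]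
    have : (pvWsScan cs 0 index).1 = (pvWsScan cs 0 index).2 - index := by omega
    exact Prod.ext this rfl
termination_by (((cs.length : Int) - index)).toNat
decreasing_by
  have := pvGet_some_lt cs (pvWsScan cs 0 index).2 hnl
  omega

-- ===== VERDICT (by name: the statement is the Claim_ definition above) =====
theorem parse_string_to_indentation_spec : Claim_equal_parse_string_to_indentation := by
  intro code index _ _
  unfold Spec_parse_string_to_indentation parse_string_to_indentation parse_string_to_indentation_alt
  exact pv_main code.toList index
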